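-- pv_equiv track=rewrite | github.com/AndreyWinz/hello-world-in-every-language | (())/interpreter.py | str2
-- ===== SOURCE A (Python) =====
-- def str2(tree):
--     string=""
--     indent=0
--     for paren in str(tree):
--         if paren=="(":
--             string+="\n"+"\t"*indent+paren
--             indent+=1
--         elif paren==")":
--             indent-=1
--             string+="\n"+"\t"*indent+paren
--         else:
--             string+="\n"+"\t"*indent+paren
--     return string
-- ===== SOURCE B (Python) =====
-- def str2(tree):
--     # Two-pass: prefix-balance table, then emit one line per char from the table.
--     s = str(tree)
--     delta = {'(': 1, ')': -1}
--     bal = [0]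
--     for c in s:
--         bal.append(bal[-1] + delta.get(c, 0))
--     return "".join("\n" + "\t" * (bal[i] - (c == ')')) + c for i, c in enumerate(s))
-- ===== Notes on version B (the rewrite author's own statement) =====
-- stated objective: alternative
-- what changed: Replaces A's single loop that mutates an indent counter while concatenating onto a string by a two-pass decomposition: first build a prefix-balance table (bal[i] = parenthesis balance before char i), then emit each char's line from the table (indent = bal[i] minus 1 for ')') and join them.
import Mathlib
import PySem

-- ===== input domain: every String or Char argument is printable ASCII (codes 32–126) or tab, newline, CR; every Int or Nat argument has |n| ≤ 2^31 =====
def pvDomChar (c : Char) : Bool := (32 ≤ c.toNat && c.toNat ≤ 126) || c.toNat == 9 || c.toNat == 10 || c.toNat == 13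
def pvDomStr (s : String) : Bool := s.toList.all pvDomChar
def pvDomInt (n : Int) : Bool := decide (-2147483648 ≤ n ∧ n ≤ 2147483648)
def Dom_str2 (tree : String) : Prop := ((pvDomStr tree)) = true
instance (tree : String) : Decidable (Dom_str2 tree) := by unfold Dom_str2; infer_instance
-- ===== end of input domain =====

-- B replaces A's mutating indent counter by a prefix-balance table and a per-char join (different decomposition, same output).

-- ===== PORT A =====
-- one step of A's for-loop; "\t"*indent is List.replicate indent.toNat (empty for negative indent, as in Python)
def str2Step (st : List Char × Int) (paren : Char) : List Char × Int :=
  if paren = '(' then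
    (st.1 ++ '\n' :: (List.replicate st.2.toNat '\t' ++ [paren]), st.2 + 1)
  else if paren = ')' then
    (st.1 ++ '\n' :: (List.replicate (st.2 - 1).toNat '\t' ++ [paren]), st.2 - 1)
  else
    (st.1 ++ '\n' :: (List.replicate st.2.toNat '\t' ++ [paren]), st.2)

def str2 (tree : String) : String :=
  String.mk (tree.toList.foldl str2Step ([], 0)).1

-- ===== PORT B =====
-- delta.get(c, 0) on the two-entry literal dict {'(': 1, ')': -1}
def pvDelta (c : Char) : Int := if c = '(' then 1 else if c = ')' then -1 else 0

-- bal = [0]; for c in s: bal.append(bal[-1] + delta.get(c, 0))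
def pvBal (cs : List Char) : List Int :=
  cs.foldl (fun bal c => bal ++ [PySem.List.pyGetD bal (-1) 0 + pvDelta c]) [0]

-- one joined piece: "\n" + "\t"*(bal[i] - (c == ')')) + c
def pvLine (bal : List Int) (p : Int × Char) : List Char :=
  '\n' :: (List.replicate (PySem.List.pyGetD bal p.1 0 - (if p.2 = ')' then 1 else 0)).toNat '\t' ++ [p.2])

def str2_alt (tree : String) : String :=
  let s := tree.toList
  let bal := pvBal s
  String.mk ((PySem.List.enumerate s).flatMap (pvLine bal))

-- ===== PRECONDITION & SPEC =====
def Spec_str2 (tree : String) (out : String) : Prop := out = str2_alt tree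
instance (tree : String) (out : String) : Decidable (Spec_str2 tree out) := by unfold Spec_str2; infer_instance

-- ===== CLAIM (what is proved, stated in full; the proofs are below) =====
def Claim_equal_str2 : Prop := ∀ (tree : String), Dom_str2 tree → Spec_str2 tree (str2 tree)

-- ===== LEMMAS AND PROOFS =====

lemma pvBal_length (cs : List Char) : (pvBal cs).length = cs.length + 1 := by
  induction cs using List.reverseRecOn with
  | nil => simp [pvBal]
  | append_singleton cs c ih => simp [pvBal, List.foldl_append] at *; omega

lemma pvBal_snoc (cs : List Char) (c : Char) :
    pvBal (cs ++ [c]) = pvBal cs ++ [PySem.List.pyGetD (pvBal cs) (-1) 0 + pvDelta c] := by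
  simp [pvBal, List.foldl_append]

lemma pvBal_ne_nil (cs : List Char) : pvBal cs ≠ [] := by
  have := pvBal_length cs; intro h; simp [h] at this

-- the running last balance
def pvLast (cs : List Char) : Int := PySem.List.pyGetD (pvBal cs) (-1) 0

lemma pvLast_snoc (cs : List Char) (c : Char) : pvLast (cs ++ [c]) = pvLast cs + pvDelta c := by
  simp [pvLast, pvBal_snoc, PySem.List.pyGetD_neg_one_append_singleton]

lemma pyGetD_append_singleton_lt (xs : List Int) (x : Int) (k : Nat) (h : k < xs.length) :
    PySem.List.pyGetD (xs ++ [x]) (k : Int) 0 = PySem.List.pyGetD xs (k : Int) 0 := by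
  simp [PySem.List.pyGetD_natCast, List.getD, List.getElem?_append_left h]

lemma pvLine_append_singleton (cs : List Char) (c : Char) (p : Int × Char)
    (hp : p ∈ PySem.List.enumerate cs) :
    pvLine (pvBal (cs ++ [c])) p = pvLine (pvBal cs) p := by
  rcases (PySem.List.mem_enumerate_iff _ _ _).1 hp with ⟨k, hk, rfl⟩
  have hk' : k < (pvBal cs).length := by rw [pvBal_length]; omega
  simp only [pvLine, pvBal_snoc, zero_add]
  rw [pyGetD_append_singleton_lt _ _ _ hk']

lemma pyGetD_last (xs : List Int) (h : xs ≠ []) :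
    PySem.List.pyGetD xs ((xs.length : Int) - 1) 0 = PySem.List.pyGetD xs (-1) 0 := by
  have hlen : 0 < xs.length := List.length_pos_iff.mpr h
  rw [PySem.List.pyGetD_neg_one xs 0 h]
  have hc : ((xs.length : Int) - 1) = ((xs.length - 1 : Nat) : Int) := by omega
  rw [hc, PySem.List.pyGetD_natCast]
  rw [List.getD_eq_getElem?_getD, List.getElem?_eq_getElem (by omega)]
  simp [List.getLast_eq_getElem]

-- main invariant: A's loop state after a prefix = (B's rendering of that prefix, last balance)
lemma str2_invariant (cs : List Char) :
    cs.foldl str2Step ([], 0) =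
      ((PySem.List.enumerate cs).flatMap (pvLine (pvBal cs)), pvLast cs) := by
  induction cs using List.reverseRecOn with
  | nil => simp [pvLast, pvBal, PySem.List.enumerate]; decide
  | append_singleton cs c ih =>
    rw [List.foldl_append, List.foldl_cons, List.foldl_nil, ih]
    have hmap : (PySem.List.enumerate (cs ++ [c])).flatMap (pvLine (pvBal (cs ++ [c])))
        = (PySem.List.enumerate cs).flatMap (pvLine (pvBal cs))
          ++ pvLine (pvBal (cs ++ [c])) ((cs.length : Int), c) := by
      rw [PySem.List.enumerate_append]
      simp only [List.flatMap_append, zero_add]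
      congr 1
      · exact List.flatMap_congr (fun p hp => pvLine_append_singleton cs c p hp)
      · simp [PySem.List.enumerate]
    have hnew : pvLine (pvBal (cs ++ [c])) ((cs.length : Int), c)
        = '\n' :: (List.replicate (pvLast cs - (if c = ')' then 1 else 0)).toNat '\t' ++ [c]) := by
      simp only [pvLine]
      rw [pvBal_snoc,
        pyGetD_append_singleton_lt _ _ cs.length (by rw [pvBal_length]; omega)]
      have hc : (cs.length : Int) = ((pvBal cs).length : Int) - 1 := by
        rw [pvBal_length]; push_cast; ring
      rw [hc, pyGetD_last _ (pvBal_ne_nil _)]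
      rfl
    rw [hmap, hnew, pvLast_snoc]
    unfold str2Step
    by_cases h1 : c = '('
    · simp [h1, pvDelta]
    · by_cases h2 : c = ')'
      · simp [h2, pvDelta]; ring
      · simp [h1, h2, pvDelta]

-- ===== VERDICT (by name: the statement is the Claim_ definition above) =====
theorem str2_spec : Claim_equal_str2 := by
  intro tree _
  unfold Spec_str2 str2 str2_alt
  rw [str2_invariant]
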